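-- pv_equiv track=rewrite | github.com/Shikher-jain/SJ_MAIN | Problem Solving/GFG/December 2024/gfg03_12.py | minChar
-- ===== SOURCE A (Python) =====
-- def minChar(s):
--     #Write your code here
--
--     n=len(s)
--     left,right,miss=0,n-1,n-1
--
--     while left < right :
--         if s[left] == s[right]:
--             left+=1
--             right-=1
--
--         else:
--             miss-=1
--             left=0
--             right = miss
--
--     return n-1-miss
-- ===== SOURCE B (Python) =====
-- def minChar(s):
--     rev = s[::-1]
--     i = 0
--     while not s.startswith(rev[i:]):
--         i += 1
--     return i
-- ===== Notes on version B (the rewrite author's own statement) =====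
-- stated objective: idiomatic
-- what changed: replaces A's two-pointer scan with restart-on-mismatch by a single ascending search for the smallest i with s.startswith(reverse(s)[i:]), which is the answer directly
import Mathlib
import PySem

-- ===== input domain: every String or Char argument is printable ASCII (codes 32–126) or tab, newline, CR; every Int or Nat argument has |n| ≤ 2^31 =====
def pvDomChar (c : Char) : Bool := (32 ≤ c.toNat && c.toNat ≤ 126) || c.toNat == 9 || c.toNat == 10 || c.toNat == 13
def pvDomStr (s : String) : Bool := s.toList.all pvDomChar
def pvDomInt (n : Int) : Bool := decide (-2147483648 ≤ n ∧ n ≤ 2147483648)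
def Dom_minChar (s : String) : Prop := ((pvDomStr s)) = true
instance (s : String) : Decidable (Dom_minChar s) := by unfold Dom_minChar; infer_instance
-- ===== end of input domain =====

-- B replaces A's two-pointer scan with restart-on-mismatch by a single descending
-- loop comparing each prefix with its reversal (simpler; same worst-case cost).

-- ===== PORT A =====
-- termination lemmas for the while loop's lexicographic measure (cited by name below)
theorem pvDecrMatch (left right miss : Int) (h : left < right) :
    Prod.Lex (· < ·) (· < ·) ((miss + 1).toNat, (right - 1 - (left + 1)).toNat)
      ((miss + 1).toNat, (right - left).toNat) :=
  Prod.Lex.right _ (by omega)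

theorem pvDecrMiss (left right miss : Int) (h : left < right) :
    Prod.Lex (· < ·) (· < ·) ((miss - 1 + 1).toNat, (miss - 1 - 0).toNat)
      ((miss + 1).toNat, (right - left).toNat) := by
  by_cases hm : 0 ≤ miss
  · exact Prod.Lex.left _ _ (by omega)
  · exact Prod.Lex.right' _ (by omega) (by omega)

-- A's while loop: state (left, right, miss); s[i] is in range whenever the
-- comparison is reached, so pyGet? equality is exact there.
def minCharLoop (cs : List Char) (n left right miss : Int) : Int :=
  if _h : left < right then
    if PySem.List.pyGet? cs left = PySem.List.pyGet? cs right then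
      minCharLoop cs n (left + 1) (right - 1) miss
    else
      minCharLoop cs n 0 (miss - 1) (miss - 1)
  else
    n - 1 - miss
termination_by ((miss + 1).toNat, (right - left).toNat)
decreasing_by
  · exact pvDecrMatch left right miss _h
  · exact pvDecrMiss left right miss _h

def minChar (s : String) : Int :=
  let cs := s.toList
  let n : Int := cs.length
  minCharLoop cs n 0 (n - 1) (n - 1)

-- ===== PORT B =====
-- termination lemma for Source B's while loop (cited by name below): once i reaches
-- rev.length, rev[i:] is empty and startswith succeeds, so the loop has stopped
theorem pvDecrAlt (cs rev : List Char) (i : Nat)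
    (h : ¬ (rev.drop i).isPrefixOf cs = true) :
    rev.length + 1 - (i + 1) < rev.length + 1 - i := by
  by_contra hc
  have hi : rev.length ≤ i := by omega
  rw [List.drop_eq_nil_of_le hi] at h
  exact h (List.isPrefixOf_nil_left)

-- Source B's while loop over i; s.startswith(t) is List.isPrefixOf t s, rev[i:] with
-- i ≥ 0 is List.drop i, s[::-1] is List.reverse — exact on every admitted input.
def minCharAltLoop (cs rev : List Char) (i : Nat) : Nat :=
  if _h : (rev.drop i).isPrefixOf cs then i
  else minCharAltLoop cs rev (i + 1)
termination_by rev.length + 1 - i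
decreasing_by exact pvDecrAlt cs rev i _h

def minChar_alt (s : String) : Int :=
  let cs := s.toList
  let rev := cs.reverse
  (minCharAltLoop cs rev 0 : Int)

-- ===== PRECONDITION & SPEC =====
def Spec_minChar (s : String) (out : Int) : Prop := out = minChar_alt s
instance (s : String) (out : Int) : Decidable (Spec_minChar s out) := by unfold Spec_minChar; infer_instance

-- ===== CLAIM (what is proved, stated in full; the proofs are below) =====
def Claim_equal_minChar : Prop := ∀ (s : String), Dom_minChar s → Spec_minChar s (minChar s)

-- ===== LEMMAS AND PROOFS =====

-- `pal cs m`: the prefix of length m reads the same backwards.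
def pal (cs : List Char) (m : Nat) : Prop := cs.take m = (cs.take m).reverse

-- greatest m' ≤ m with pal (m'+1)  (pal 1 always holds)
def gpal (cs : List Char) : Nat → Nat
  | 0 => 0
  | m + 1 => if cs.take (m + 2) = (cs.take (m + 2)).reverse then m + 1 else gpal cs m

theorem pal_iff (cs : List Char) (m : Nat) (hm : m < cs.length) :
    pal cs (m + 1) ↔ ∀ i ≤ m, cs[i]? = cs[m - i]? := by
  unfold pal
  constructor
  · intro h i hi
    have hl : (cs.take (m + 1)).length = m + 1 := by
      simp [List.length_take]; omega
    have := congrArg (fun l => l[i]?) h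
    simp only at this
    rw [List.getElem?_reverse (by omega)] at this
    rw [List.getElem?_take_of_lt (by omega), List.getElem?_take_of_lt (by omega)] at this
    simpa [hl, Nat.sub_sub, show m + 1 - 1 - i = m - i by omega] using this
  · intro h
    have hl : (cs.take (m + 1)).length = m + 1 := by
      simp [List.length_take]; omega
    apply List.ext_getElem?
    intro i
    by_cases hi : i < m + 1
    · rw [List.getElem?_reverse (by omega)]
      rw [List.getElem?_take_of_lt (by omega), List.getElem?_take_of_lt (by omega)]
      rw [hl]
      have := h i (by omega)
      simpa [show m + 1 - 1 - i = m - i by omega] using this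
    · rw [List.getElem?_eq_none (by omega), List.getElem?_eq_none (by simp [hl]; omega)]

theorem pal_one (cs : List Char) : pal cs 1 := by
  unfold pal
  cases cs <;> simp

-- half coverage suffices
theorem halfPal (cs : List Char) (left right m : Nat) (hm : m < cs.length)
    (hs : left + right = m) (hlr : right ≤ left)
    (hmatch : ∀ i < left, cs[i]? = cs[m - i]?) : pal cs (m + 1) := by
  rw [pal_iff cs m hm]
  intro i hi
  by_cases h1 : i < left
  · exact hmatch i h1
  · by_cases h2 : m - i < left
    · have := hmatch (m - i) h2
      rw [show m - (m - i) = i by omega] at this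
      exact this.symm
    · have : i = m - i := by omega
      rw [← this]

-- match run: on a palindromic candidate the loop walks to the middle and exits
theorem minCharLoop_pal (cs : List Char) (n : Int) :
    ∀ d left right m : Nat, right - left = d → left + right = m → m < cs.length →
    pal cs (m + 1) →
    minCharLoop cs n left right m = n - 1 - m := by
  intro d
  induction d using Nat.strong_induction_on with
  | _ d ih =>
    intro left right m hd hs hm hp
    rw [minCharLoop]
    by_cases hlr : (left : Int) < right
    · have hlr' : left < right := by omega
      rw [dif_pos hlr]
      have heq : cs[left]? = cs[right]? := by
        have := (pal_iff cs m hm).mp hp left (by omega)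
        rwa [show m - left = right by omega] at this
      have hget : PySem.List.pyGet? cs (left : Int) = PySem.List.pyGet? cs (right : Int) := by
        rw [PySem.List.pyGet?_natCast, PySem.List.pyGet?_natCast, heq]
      rw [if_pos hget]
      have : ((left : Int) + 1) = ((left + 1 : Nat) : Int) := by push_cast; ring
      rw [this, show ((right : Int) - 1) = ((right - 1 : Nat) : Int) by omega]
      exact ih (right - 1 - (left + 1)) (by omega) (left + 1) (right - 1) m (by omega)
        (by omega) hm hp
    · rw [dif_neg hlr]

-- mismatch run: a non-palindromic candidate is abandoned and the loop restarts
theorem minCharLoop_nopal (cs : List Char) (n : Int) :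
    ∀ d left right m : Nat, right - left = d → left + right = m → m < cs.length →
    (∀ i < left, cs[i]? = cs[m - i]?) → ¬ pal cs (m + 1) →
    minCharLoop cs n left right m = minCharLoop cs n 0 ((m : Int) - 1) ((m : Int) - 1) := by
  intro d
  induction d using Nat.strong_induction_on with
  | _ d ih =>
    intro left right m hd hs hm hmatch hnp
    have hlr' : left < right := by
      by_contra hcon
      exact hnp (halfPal cs left right m hm hs (by omega) hmatch)
    rw [minCharLoop]
    rw [dif_pos (show (left : Int) < right by exact_mod_cast hlr')]
    by_cases hget : PySem.List.pyGet? cs (left : Int) = PySem.List.pyGet? cs (right : Int)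
    · rw [if_pos hget]
      have heq : cs[left]? = cs[right]? := by
        rwa [PySem.List.pyGet?_natCast, PySem.List.pyGet?_natCast] at hget
      have hmatch' : ∀ i < left + 1, cs[i]? = cs[m - i]? := by
        intro i hi
        by_cases h1 : i < left
        · exact hmatch i h1
        · have : i = left := by omega
          subst this
          rwa [show m - i = right by omega]
      rw [show ((left : Int) + 1) = ((left + 1 : Nat) : Int) by push_cast; ring,
        show ((right : Int) - 1) = ((right - 1 : Nat) : Int) by omega]
      exact ih (right - 1 - (left + 1)) (by omega) (left + 1) (right - 1) m (by omega)
        (by omega) hm hmatch' hnp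
    · rw [if_neg hget]

-- A's loop, started fresh on candidate m, computes gpal
theorem minCharLoop_gpal (cs : List Char) (n : Int) :
    ∀ m : Nat, m < cs.length →
    minCharLoop cs n 0 (m : Int) (m : Int) = n - 1 - gpal cs m := by
  intro m
  induction m with
  | zero =>
    intro hm
    have := minCharLoop_pal cs n 0 0 0 0 rfl rfl hm (pal_one cs)
    simpa [gpal] using this
  | succ m ihm =>
    intro hm
    by_cases hp : pal cs (m + 2)
    · have := minCharLoop_pal cs n (m + 1) 0 (m + 1) (m + 1) (by omega) (by omega) hm hp
      rw [gpal, if_pos (show cs.take (m + 2) = (cs.take (m + 2)).reverse from hp)]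
      simpa using this
    · have h1 := minCharLoop_nopal cs n (m + 1) 0 (m + 1) (m + 1) (by omega) (by omega) hm
        (by intro i hi; omega) hp
      rw [gpal, if_neg (show ¬ cs.take (m + 2) = (cs.take (m + 2)).reverse from hp)]
      simp only [Nat.cast_succ, Nat.cast_zero] at h1 ⊢
      rw [show (m : Int) + 1 - 1 = (m : Int) by ring] at h1
      rw [h1, ihm (by omega)]

-- the loop's test at index i is palindromicity of the prefix of length n - i
theorem pref_iff (cs : List Char) (i : Nat) :
    (cs.reverse.drop i).isPrefixOf cs = true ↔ pal cs (cs.length - i) := by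
  have hdrop : cs.reverse.drop i = (cs.take (cs.length - i)).reverse := by
    by_cases h : i ≤ cs.length
    · rw [List.reverse_take, show cs.length - (cs.length - i) = i by omega]
    · rw [show cs.length - i = 0 by omega]
      simp [List.drop_eq_nil_of_le, show cs.length ≤ i by omega]
  rw [List.isPrefixOf_iff_prefix, List.prefix_iff_eq_take, hdrop, List.length_reverse,
    List.length_take, Nat.min_eq_left (Nat.sub_le _ _)]
  unfold pal
  exact eq_comm

-- B's loop computes gpal + 1
theorem minCharAltLoop_gpal (cs : List Char) :
    ∀ m : Nat, m + 1 ≤ cs.length →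
    minCharAltLoop cs cs.reverse (cs.length - (m + 1)) = cs.length - (gpal cs m + 1) := by
  intro m
  induction m with
  | zero =>
    intro hm
    rw [minCharAltLoop]
    simp only [show (0 : Nat) + 1 = 1 from rfl]
    rw [dif_pos ((pref_iff cs (cs.length - 1)).mpr (by
      rw [show cs.length - (cs.length - 1) = 1 by omega]; exact pal_one cs))]
    rfl
  | succ m ihm =>
    intro hm
    rw [minCharAltLoop]
    simp only [show m + 1 + 1 = m + 2 from rfl]
    by_cases hp : pal cs (m + 2)
    · rw [dif_pos ((pref_iff cs (cs.length - (m + 2))).mpr (by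
        rw [show cs.length - (cs.length - (m + 2)) = m + 2 by omega]; exact hp))]
      rw [gpal, if_pos (show cs.take (m + 2) = (cs.take (m + 2)).reverse from hp)]
    · rw [dif_neg (by
        rw [pref_iff cs (cs.length - (m + 2)),
          show cs.length - (cs.length - (m + 2)) = m + 2 by omega]
        exact hp)]
      rw [show cs.length - (m + 2) + 1 = cs.length - (m + 1) by omega, ihm (by omega)]
      rw [gpal, if_neg (show ¬ cs.take (m + 2) = (cs.take (m + 2)).reverse from hp)]

-- ===== VERDICT (by name: the statement is the Claim_ definition above) =====
theorem minChar_spec : Claim_equal_minChar := by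
  intro s _
  unfold Spec_minChar minChar minChar_alt
  simp only
  rcases Nat.eq_zero_or_pos s.toList.length with h | h
  · have hnil : s.toList = [] := List.length_eq_zero_iff.mp h
    rw [hnil]
    simp only [List.length_nil, Nat.cast_zero]
    rw [minCharLoop, minCharAltLoop]
    norm_num
  · obtain ⟨m, hm⟩ : ∃ m, s.toList.length = m + 1 := ⟨s.toList.length - 1, by omega⟩
    have hz : (0 : Nat) = s.toList.length - (m + 1) := by omega
    rw [hm, hz, minCharAltLoop_gpal s.toList m (by omega), hm]
    rw [show ((m + 1 : Nat) : Int) - 1 = ((m : Nat) : Int) by push_cast; ring]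
    rw [minCharLoop_gpal s.toList _ m (by omega)]
    have hg : gpal s.toList m ≤ m := by
      clear hz hm
      induction m with
      | zero => simp [gpal]
      | succ m ih => rw [gpal]; split <;> omega
    omega
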